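-- pv_equiv track=rewrite | github.com/kaelemc/US18741 | application/fines.py | CalculateFines
-- ===== SOURCE A (Python) =====
-- fine_ranges = [[0,10],[11,15],[16,20],[21,25],[26,31],[31,35],[36,40],[41,45]]
--
-- fines = [30, 80, 120, 170, 230, 300, 400, 510, 630]
--
-- speed_limit = 80
--
-- def CalculateFines(speed):
--     over = speed - speed_limit
--     if over == 0:
--         return None
--     elif over > fine_ranges[len(fine_ranges)-1][0]:
--         return fines[len(fines)-1]    # return the last fine in the list
--     else:
--         for i, x in reversed(list(enumerate(fine_ranges))):
--             if over >= fine_ranges[i][0]: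
--                 return fines[i]
--                 break
-- ===== SOURCE B (Python) =====
-- fines = [30, 80, 120, 170, 230, 300, 400, 510, 630]
--
-- speed_limit = 80
--
-- # Sorted lower-bound thresholds for tiers 1..7 (tier 0 covers 0 < over <= 10).
-- _THRESHOLDS = [11, 16, 21, 26, 31, 36, 41]
--
-- def CalculateFines(speed):
--     over = speed - speed_limit
--     if over <= 0:
--         return None
--     if over > 41:
--         return fines[8]
--     # binary search: number of thresholds <= over (bisect_right by hand)
--     lo, hi = 0, len(_THRESHOLDS)
--     while lo < hi:
--         mid = (lo + hi) // 2
--         if _THRESHOLDS[mid] <= over: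
--             lo = mid + 1
--         else:
--             hi = mid
--     return fines[lo]
-- ===== Notes on version B (the rewrite author's own statement) =====
-- stated objective: alternative
-- what changed: Replaces the reversed linear scan over the range table with a hand-rolled bisect_right binary search over the sorted lower-bound thresholds (the unused upper bounds are dropped), folding over==0 and negative overspeed into one over<=0 guard.
import Mathlib
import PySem

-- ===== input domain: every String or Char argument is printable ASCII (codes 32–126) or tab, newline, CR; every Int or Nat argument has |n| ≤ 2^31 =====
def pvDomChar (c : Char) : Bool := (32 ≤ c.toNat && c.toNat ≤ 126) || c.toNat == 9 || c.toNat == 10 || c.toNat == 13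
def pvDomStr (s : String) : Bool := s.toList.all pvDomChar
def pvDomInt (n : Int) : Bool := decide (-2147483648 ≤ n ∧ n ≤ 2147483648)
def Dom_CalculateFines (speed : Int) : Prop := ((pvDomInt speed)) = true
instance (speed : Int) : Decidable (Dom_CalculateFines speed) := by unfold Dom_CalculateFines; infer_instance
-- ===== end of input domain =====

-- B replaces A's reversed linear scan of the range table by a binary search over
-- the sorted lower-bound thresholds (alternative algorithm, same result).

-- ===== PORT A =====
def fineRanges : List (List Int) :=
  [[0,10],[11,15],[16,20],[21,25],[26,31],[31,35],[36,40],[41,45]]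

def finesA : List Int := [30, 80, 120, 170, 230, 300, 400, 510, 630]

-- the 'for i, x in reversed(list(enumerate(fine_ranges)))' loop; falling off returns None
def fineLoop (ov : Int) : List (Int × List Int) → Option Int
  | [] => none
  | (i, _) :: rest =>
    match PySem.List.pyGet? fineRanges i with
    | none => none  -- unreachable: IndexError
    | some r =>
      match PySem.List.pyGet? r 0 with
      | none => none  -- unreachable: IndexError
      | some lb => if ov ≥ lb then PySem.List.pyGet? finesA i else fineLoop ov rest

def CalculateFines (speed : Int) : Option Int :=
  let ov := speed - 80
  if ov = 0 then none
  else if ov > ((fineRanges.getD (fineRanges.length - 1) []).getD 0 0) then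
    PySem.List.pyGet? finesA ((finesA.length : Int) - 1)
  else
    fineLoop ov (PySem.List.enumerate fineRanges).reverse

-- ===== PORT B =====
def finesB : List Int := [30, 80, 120, 170, 230, 300, 400, 510, 630]

def thresholds : List Int := [11, 16, 21, 26, 31, 36, 41]

-- the 'while lo < hi' bisect_right loop
def bisectR (ov : Int) (lo hi : Nat) : Nat :=
  if _h : lo < hi then
    let mid := (lo + hi) / 2
    if thresholds.getD mid 0 ≤ ov then bisectR ov (mid + 1) hi
    else bisectR ov lo mid
  else lo
termination_by hi - lo
decreasing_by all_goals omega

def CalculateFines_alt (speed : Int) : Option Int :=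
  let ov := speed - 80
  if ov ≤ 0 then none
  else if ov > 41 then PySem.List.pyGet? finesB 8
  else PySem.List.pyGet? finesB ((bisectR ov 0 thresholds.length : Nat) : Int)

-- ===== PRECONDITION & SPEC =====
def Spec_CalculateFines (speed : Int) (out : Option Int) : Prop := out = CalculateFines_alt speed
instance (speed : Int) (out : Option Int) : Decidable (Spec_CalculateFines speed out) := by unfold Spec_CalculateFines; infer_instance

-- ===== CLAIM (what is proved, stated in full; the proofs are below) =====
def Claim_equal_CalculateFines : Prop := ∀ (speed : Int), Dom_CalculateFines speed → Spec_CalculateFines speed (CalculateFines speed)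

-- ===== LEMMAS AND PROOFS =====

set_option maxHeartbeats 1000000 in
theorem calc_key (o : Int) :
    (if o = 0 then none
     else if o > ((fineRanges.getD (fineRanges.length - 1) []).getD 0 0) then
       PySem.List.pyGet? finesA ((finesA.length : Int) - 1)
     else fineLoop o (PySem.List.enumerate fineRanges).reverse)
    =
    (if o ≤ 0 then none
     else if o > 41 then PySem.List.pyGet? finesB 8
     else PySem.List.pyGet? finesB ((bisectR o 0 thresholds.length : Nat) : Int)) := by
  have base : ∀ n, bisectR o n n = n := by intro n; rw [bisectR]; simp
  have b67 : bisectR o 6 7 = if (41:Int) ≤ o then 7 else 6 := by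
    rw [bisectR]; norm_num [thresholds, base]
  have b45 : bisectR o 4 5 = if (31:Int) ≤ o then 5 else 4 := by
    rw [bisectR]; norm_num [thresholds, base]
  have b47 : bisectR o 4 7 = if (36:Int) ≤ o then (if (41:Int) ≤ o then 7 else 6) else (if (31:Int) ≤ o then 5 else 4) := by
    rw [bisectR]; norm_num [thresholds, b67, b45]
  have b23 : bisectR o 2 3 = if (21:Int) ≤ o then 3 else 2 := by
    rw [bisectR]; norm_num [thresholds, base]
  have b01 : bisectR o 0 1 = if (11:Int) ≤ o then 1 else 0 := by
    rw [bisectR]; norm_num [thresholds, base]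
  have b03 : bisectR o 0 3 = if (16:Int) ≤ o then (if (21:Int) ≤ o then 3 else 2) else (if (11:Int) ≤ o then 1 else 0) := by
    rw [bisectR]; norm_num [thresholds, b23, b01]
  have b07 : bisectR o 0 7 = if (26:Int) ≤ o then (if (36:Int) ≤ o then (if (41:Int) ≤ o then 7 else 6) else (if (31:Int) ≤ o then 5 else 4)) else (if (16:Int) ≤ o then (if (21:Int) ≤ o then 3 else 2) else (if (11:Int) ≤ o then 1 else 0)) := by
    rw [bisectR]; norm_num [thresholds, b47, b03]
  have hlen : thresholds.length = 7 := by norm_num [thresholds]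
  have lhs : fineLoop o (PySem.List.enumerate fineRanges).reverse =
      (if o ≥ 41 then some 510 else if o ≥ 36 then some 400 else
       if o ≥ 31 then some 300 else if o ≥ 26 then some 230 else
       if o ≥ 21 then some 170 else if o ≥ 16 then some 120 else
       if o ≥ 11 then some 80 else if o ≥ 0 then some 30 else none) := by
    norm_num [fineRanges, finesA, PySem.List.enumerate, fineLoop,
      PySem.List.pyGet?, PySem.List.pyIdx?, Int.toNat]
  have hc : ((fineRanges.getD (fineRanges.length - 1) []).getD 0 0) = 41 := by
    norm_num [fineRanges]
  have hf : PySem.List.pyGet? finesA ((finesA.length : Int) - 1) = some 630 := by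
    norm_num [finesA, PySem.List.pyGet?, PySem.List.pyIdx?, Int.toNat]
  rw [hlen, b07, lhs, hc, hf]
  split_ifs <;>
    norm_num [finesB, PySem.List.pyGet?, PySem.List.pyIdx?, Int.toNat] <;>
    omega

-- ===== VERDICT (by name: the statement is the Claim_ definition above) =====
theorem CalculateFines_spec : Claim_equal_CalculateFines := by
  intro speed _
  unfold Spec_CalculateFines CalculateFines CalculateFines_alt
  exact calc_key (speed - 80)
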